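-- pv_equiv track=rewrite | github.com/calum-hand/Flasche | flasche/conjugations.py | parse_conjugations
-- ===== SOURCE A (Python) =====
-- from typing import List, Dict
--
-- def parse_conjugations(conjugation_block: List[List[str]]) -> Dict[str, Dict[str, str]]:
--     def _parse(v):
--         return "".join([c for c in v if c.isalpha()])
--
--     def _update(p):
--         if p == "er":
--             return "er/sie/es"
--         elif p == "sie":
--             return "sie/Sie"
--         return p
--
--     mapping = {
--         "Present": {},
--         "Imperfect": {},
--         "Perfect": {},
--     }
--
--     for row in conjugation_block:
--         mapping["Present"][_update(row[0])] = _parse(row[1])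
--         mapping["Imperfect"][_update(row[2])] = _parse(row[3])
--         mapping["Perfect"][_update(row[-3])] = f"{row[-2]} {row[-1]}"
--
--     return mapping
-- ===== SOURCE B (Python) =====
-- def parse_conjugations(conjugation_block):
--     def _parse(v):
--         return "".join(c for c in v if c.isalpha())
--
--     _PRONOUNS = {"er": "er/sie/es", "sie": "sie/Sie"}
--
--     spec = [
--         ("Present", lambda r: (r[0], _parse(r[1]))),
--         ("Imperfect", lambda r: (r[2], _parse(r[3]))),
--         ("Perfect", lambda r: (r[-3], r[-2] + " " + r[-1])),
--     ]
--     return {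
--         name: {_PRONOUNS.get(k, k): v for k, v in map(pick, conjugation_block)}
--         for name, pick in spec
--     }
-- ===== Notes on version B (the rewrite author's own statement) =====
-- stated objective: idiomatic
-- what changed: Replaces A's single pass mutating three dicts per row by a declarative spec table (tense name, row->key/value extractor) consumed by a nested dict comprehension, building each tense's dict in its own pass; pronoun normalisation becomes a dict lookup instead of an if/elif chain.
import Mathlib
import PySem

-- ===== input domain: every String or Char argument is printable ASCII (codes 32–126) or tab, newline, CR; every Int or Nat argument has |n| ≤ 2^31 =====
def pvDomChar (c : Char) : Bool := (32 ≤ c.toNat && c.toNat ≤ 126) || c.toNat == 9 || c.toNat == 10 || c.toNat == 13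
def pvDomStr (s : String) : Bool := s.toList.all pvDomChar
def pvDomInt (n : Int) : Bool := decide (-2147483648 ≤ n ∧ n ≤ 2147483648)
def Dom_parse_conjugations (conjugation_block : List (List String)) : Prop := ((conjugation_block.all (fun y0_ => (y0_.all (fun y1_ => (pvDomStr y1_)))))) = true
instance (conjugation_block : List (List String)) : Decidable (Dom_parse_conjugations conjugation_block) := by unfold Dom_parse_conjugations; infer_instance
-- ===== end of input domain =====

-- B replaces A's per-row mutation of three dicts by a table-driven per-tense dict
-- comprehension (one pass per tense); objective: simpler/more idiomatic, same cost.

-- ===== PORT A =====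
def aParse (v : String) : String := String.mk (v.toList.filter (fun c => PySem.Chars.isalpha c))
def aUpdate (p : String) : String := if p == "er" then "er/sie/es" else if p == "sie" then "sie/Sie" else p
-- row[i]; Pre_ guarantees the index is in range (Python raises IndexError outside Pre_)
def aGet (row : List String) (i : Int) : String := (PySem.List.pyGet? row i).getD ""
def aStep (st : PySem.Dict String String × PySem.Dict String String × PySem.Dict String String)
    (row : List String) : PySem.Dict String String × PySem.Dict String String × PySem.Dict String String :=
  (st.1.insert (aUpdate (aGet row 0)) (aParse (aGet row 1)),
   st.2.1.insert (aUpdate (aGet row 2)) (aParse (aGet row 3)),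
   st.2.2.insert (aUpdate (aGet row (-3))) (aGet row (-2) ++ " " ++ aGet row (-1)))
def parse_conjugations (conjugation_block : List (List String)) : List (String × List (String × String)) :=
  let st := conjugation_block.foldl aStep (PySem.Dict.empty, PySem.Dict.empty, PySem.Dict.empty)
  [("Present", st.1.items), ("Imperfect", st.2.1.items), ("Perfect", st.2.2.items)]

-- ===== PORT B =====
def bParse (v : String) : String := String.mk (v.toList.filter (fun c => PySem.Chars.isalpha c))
def bPronouns : PySem.Dict String String := PySem.Dict.ofList [("er", "er/sie/es"), ("sie", "sie/Sie")]
def bGet (row : List String) (i : Int) : String := (PySem.List.pyGet? row i).getD ""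
-- {_PRONOUNS.get(k, k): v for k, v in map(pick, conjugation_block)}
def bTense (pick : List String → String × String) (conjugation_block : List (List String)) : List (String × String) :=
  ((conjugation_block.map pick).foldl
    (fun d kv => d.insert (bPronouns.getD kv.1 kv.1) kv.2) PySem.Dict.empty).items
def parse_conjugations_alt (conjugation_block : List (List String)) : List (String × List (String × String)) :=
  [("Present",   bTense (fun r => (bGet r 0, bParse (bGet r 1))) conjugation_block),
   ("Imperfect", bTense (fun r => (bGet r 2, bParse (bGet r 3))) conjugation_block),
   ("Perfect",   bTense (fun r => (bGet r (-3), bGet r (-2) ++ " " ++ bGet r (-1))) conjugation_block)]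

-- ===== PRECONDITION & SPEC =====
-- Pre_: every row has at least 4 cells; on shorter rows Python A raises IndexError (row[3] / row[-3]).
def Pre_parse_conjugations (conjugation_block : List (List String)) : Prop :=
  ∀ row ∈ conjugation_block, 4 ≤ row.length
instance (conjugation_block : List (List String)) : Decidable (Pre_parse_conjugations conjugation_block) := by unfold Pre_parse_conjugations; infer_instance
def pvWitness_parse_conjugations : List (List String) :=
  [["ich", "bin", "ich", "war", "ich", "bin", "gewesen"], ["er", "ist", "er", "war", "er", "ist", "gewesen"]]
def Spec_parse_conjugations (conjugation_block : List (List String)) (out : List (String × List (String × String))) : Prop := out = parse_conjugations_alt conjugation_block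
instance (conjugation_block : List (List String)) (out : List (String × List (String × String))) : Decidable (Spec_parse_conjugations conjugation_block out) := by unfold Spec_parse_conjugations; infer_instance

-- ===== CLAIM (what is proved, stated in full; the proofs are below) =====
def Claim_equal_parse_conjugations : Prop := ∀ (conjugation_block : List (List String)), Dom_parse_conjugations conjugation_block → Pre_parse_conjugations conjugation_block → Spec_parse_conjugations conjugation_block (parse_conjugations conjugation_block)

-- ===== LEMMAS AND PROOFS =====

theorem aUpdate_eq (p : String) : bPronouns.getD p p = aUpdate p := by
  by_cases h1 : p = "er"
  · simp [h1, bPronouns, aUpdate]; decide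
  · by_cases h2 : p = "sie"
    · simp [h2, bPronouns, aUpdate]; decide
    · simp [bPronouns, aUpdate, PySem.Dict.ofList, PySem.Dict.update, PySem.Dict.getD_insert,
            h1, h2]

theorem foldl_triple (block : List (List String))
    (a b c : PySem.Dict String String) :
    block.foldl aStep (a, b, c) =
      (block.foldl (fun d r => d.insert (aUpdate (aGet r 0)) (aParse (aGet r 1))) a,
       block.foldl (fun d r => d.insert (aUpdate (aGet r 2)) (aParse (aGet r 3))) b,
       block.foldl (fun d r => d.insert (aUpdate (aGet r (-3))) (aGet r (-2) ++ " " ++ aGet r (-1))) c) := by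
  induction block generalizing a b c with
  | nil => rfl
  | cons r rs ih => simp [List.foldl_cons, aStep, ih]

theorem bTense_eq (pick : List String → String × String) (block : List (List String)) :
    bTense pick block =
      (block.foldl (fun d r => d.insert (aUpdate (pick r).1) (pick r).2) PySem.Dict.empty).items := by
  simp [bTense, List.foldl_map, aUpdate_eq]

-- ===== VERDICT (by name: the statement is the Claim_ definition above) =====
theorem parse_conjugations_spec : Claim_equal_parse_conjugations := by
  intro block _ _
  show parse_conjugations block = parse_conjugations_alt block
  simp only [parse_conjugations, parse_conjugations_alt, foldl_triple, bTense_eq, bParse, aParse, bGet, aGet]
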